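-- pv_equiv track=rewrite | github.com/jjikky/Algorithm | 프로그래머스/0/120956. 옹알이 （1）/옹알이 （1）.py | solution
-- ===== SOURCE A (Python) =====
-- from itertools import permutations
--
-- def solution(babbling):
--     answer = 0
--     data=["aya", "ye", "woo", "ma"]
--     result = data+list(map(lambda x:x[0]+x[1],list(permutations(data,2))))+list(map(lambda x:x[0]+x[1]+x[2],list(permutations(data,3))))+list(map(lambda x:x[0]+x[1]+x[2]+x[3],list(permutations(data,4))))
--     for b in babbling:
--         for r in result:
--             if b==r:
--                 answer+=1
--                 break
--     return answer
-- ===== SOURCE B (Python) =====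
-- def _ok(s, avail):
--     # s is fully decomposable into distinct words from avail (empty = done)
--     if s == "":
--         return True
--     return any(s.startswith(w) and _ok(s[len(w):], [x for x in avail if x != w])
--                for w in avail)
--
--
-- def solution(babbling):
--     words = ["aya", "ye", "woo", "ma"]
--     return sum(1 for b in babbling if b != "" and _ok(b, words))
-- ===== Notes on version B (the rewrite author's own statement) =====
-- stated objective: alternative
-- what changed: B drops A's precomputed table of all 64 permutation concatenations and instead tests each babbling by recursively stripping a not-yet-used leading word from {aya, ye, woo, ma} until the string is consumed (empty babblings excluded explicitly).
import Mathlib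
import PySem

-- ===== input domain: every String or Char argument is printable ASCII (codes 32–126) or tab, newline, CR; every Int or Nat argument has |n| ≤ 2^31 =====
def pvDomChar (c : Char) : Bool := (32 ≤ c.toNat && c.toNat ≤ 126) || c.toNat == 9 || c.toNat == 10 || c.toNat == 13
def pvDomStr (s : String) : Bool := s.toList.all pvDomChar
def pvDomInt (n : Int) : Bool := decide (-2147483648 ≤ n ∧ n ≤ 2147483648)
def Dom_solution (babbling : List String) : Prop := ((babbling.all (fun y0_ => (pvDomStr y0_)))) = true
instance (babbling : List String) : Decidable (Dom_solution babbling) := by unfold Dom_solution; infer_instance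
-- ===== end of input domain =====

-- B replaces A's precomputed table of all 64 permutation concatenations by a
-- recursive prefix-stripping decomposition over the still-unused words (objective: alternative).

-- ===== PORT A =====
def pvData : List String := ["aya", "ye", "woo", "ma"]

-- result = data + 2-perm + 3-perm + 4-perm concatenations (itertools.permutations)
def pvResult : List String :=
  pvData
    ++ (PySem.List.permutations pvData 2).map
        (fun x => PySem.List.pyGetD x 0 "" ++ PySem.List.pyGetD x 1 "")
    ++ (PySem.List.permutations pvData 3).map
        (fun x => PySem.List.pyGetD x 0 "" ++ PySem.List.pyGetD x 1 "" ++ PySem.List.pyGetD x 2 "")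
    ++ (PySem.List.permutations pvData 4).map
        (fun x => PySem.List.pyGetD x 0 "" ++ PySem.List.pyGetD x 1 "" ++ PySem.List.pyGetD x 2 "" ++ PySem.List.pyGetD x 3 "")

def solution (babbling : List String) : Int :=
  babbling.foldl
    (fun answer b => if pvResult.any (fun r => b == r) then answer + 1 else answer) 0

-- ===== PORT B =====
def pvWords : List String := ["aya", "ye", "woo", "ma"]

-- _ok(s, avail): s decomposes into distinct words of avail; s[len(w):] is Str.slice
def pvOk (s : String) (avail : List String) : Bool :=
  if s = "" then true
  else avail.attach.any (fun w =>
    PySem.Str.startswith s w.1 &&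
      pvOk (PySem.Str.slice s (some (PySem.Str.len w.1)) none)
        (avail.filter (fun x => x ≠ w.1)))
termination_by avail.length
decreasing_by
  simp
  have h2 : (List.filter (fun x : {x // x ∈ avail} => !decide ((x : String) = ↑w))
      avail.attach).length < avail.attach.length :=
    List.length_filter_lt_length_iff_exists.mpr ⟨w, List.mem_attach _ _, by simp⟩
  simpa using h2


def solution_alt (babbling : List String) : Int :=
  babbling.foldl (fun acc b => if (b != "") && pvOk b pvWords then acc + 1 else acc) 0

-- ===== PRECONDITION & SPEC =====
def Spec_solution (babbling : List String) (out : Int) : Prop := out = solution_alt babbling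
instance (babbling : List String) (out : Int) : Decidable (Spec_solution babbling out) := by unfold Spec_solution; infer_instance

-- ===== CLAIM (what is proved, stated in full; the proofs are below) =====
def Claim_equal_solution : Prop := ∀ (babbling : List String), Dom_solution babbling → Spec_solution babbling (solution babbling)

-- ===== LEMMAS AND PROOFS =====

-- all concatenations of a nonempty sequence of distinct words from ws (fuel-indexed)
def pvConcats : Nat → List String → List String
  | 0, _ => []
  | n + 1, ws => ws.flatMap (fun w =>
      w :: (pvConcats n (ws.filter (fun x => x ≠ w))).map (fun t => w ++ t))

lemma pvConcats_ne_empty : ∀ (n : Nat) (ws : List String),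
    (∀ w ∈ ws, w ≠ "") → ∀ s ∈ pvConcats n ws, s ≠ "" := by
  intro n
  induction n with
  | zero => intro ws _ s hs; simp [pvConcats] at hs
  | succ n ih =>
    intro ws hne s hs
    simp only [pvConcats, List.mem_flatMap, List.mem_cons, List.mem_map] at hs
    obtain ⟨w, hw, hcase⟩ := hs
    rcases hcase with rfl | ⟨t, _, rfl⟩
    · exact hne _ hw
    · intro h
      apply hne _ hw
      have := congrArg String.toList h
      simp at this
      exact String.toList_inj.mp (by simp [this.1])

lemma pv_startswith_iff (s w : String) :
    PySem.Str.startswith s w = true ↔ ∃ t : String, s = w ++ t := by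
  rw [PySem.Str.startswith_eq, PySem.Chars.startswith_iff]
  constructor
  · rintro ⟨l, hl⟩
    exact ⟨String.ofList l, String.toList_inj.mp (by simp [← hl])⟩
  · rintro ⟨t, rfl⟩
    exact ⟨t.toList, by simp⟩

lemma pv_slice_eq (w t : String) :
    PySem.Str.slice (w ++ t) (some (PySem.Str.len w)) none = t := by
  apply String.toList_inj.mp
  rw [PySem.Str.toList_slice, PySem.Str.len_eq, PySem.Chars.slice_eq_listSlice,
    PySem.List.slice_from_natCast]
  simp

lemma pvOk_empty (ws : List String) : pvOk "" ws = true := by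
  rw [pvOk]; simp

lemma pvOk_iff_mem_concats : ∀ (n : Nat) (ws : List String), ws.length ≤ n →
    (∀ w ∈ ws, w ≠ "") → ∀ s : String, s ≠ "" →
    (pvOk s ws = true ↔ s ∈ pvConcats n ws) := by
  intro n
  induction n with
  | zero =>
    intro ws hlen _ s hs
    have : ws = [] := List.length_eq_zero_iff.mp (Nat.le_zero.mp hlen)
    subst this
    rw [pvOk]
    simp [hs, pvConcats]
  | succ n ih =>
    intro ws hlen hne s hs
    rw [pvOk, if_neg hs]
    simp only [pvConcats, List.mem_flatMap, List.mem_cons, List.mem_map,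
      List.any_eq_true, List.mem_attach, true_and, Subtype.exists]
    constructor
    · rintro ⟨w, hw, hcond⟩
      rw [Bool.and_eq_true] at hcond
      obtain ⟨hstart, hok⟩ := hcond
      obtain ⟨t, rfl⟩ := (pv_startswith_iff _ w).mp hstart
      rw [pv_slice_eq] at hok
      refine ⟨w, hw, ?_⟩
      by_cases ht : t = ""
      · subst ht; left; simp
      · right
        refine ⟨t, ?_, rfl⟩
        have hlt : (ws.filter (fun x => x ≠ w)).length < ws.length :=
          List.length_filter_lt_length_iff_exists.mpr ⟨w, hw, by simp⟩
        exact (ih _ (by omega) (fun w' hw' => hne w' (List.mem_of_mem_filter hw')) t ht).mp hok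
    · rintro ⟨w, hw, hcase⟩
      have hlt : (ws.filter (fun x => x ≠ w)).length < ws.length :=
        List.length_filter_lt_length_iff_exists.mpr ⟨w, hw, by simp⟩
      rcases hcase with rfl | ⟨t, hmem, rfl⟩
      · refine ⟨s, hw, ?_⟩
        rw [Bool.and_eq_true]
        refine ⟨(pv_startswith_iff s s).mpr ⟨"", by simp⟩, ?_⟩
        have h0 : PySem.Str.slice s (some (PySem.Str.len s)) none = "" := by
          simpa using pv_slice_eq s ""
        rw [h0]
        exact pvOk_empty _
      · have ht : t ≠ "" :=
          pvConcats_ne_empty n _ (fun w' hw' => hne w' (List.mem_of_mem_filter hw')) t hmem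
        refine ⟨w, hw, ?_⟩
        rw [Bool.and_eq_true]
        refine ⟨(pv_startswith_iff _ w).mpr ⟨t, rfl⟩, ?_⟩
        rw [pv_slice_eq]
        exact (ih _ (by omega) (fun w' hw' => hne w' (List.mem_of_mem_filter hw')) t ht).mpr hmem

lemma pvResult_sub : ∀ s ∈ pvResult, s ∈ pvConcats 4 pvWords := by decide

lemma pvConcats_sub : ∀ s ∈ pvConcats 4 pvWords, s ∈ pvResult := by decide

lemma pvWords_ne_empty : ∀ w ∈ pvWords, w ≠ "" := by decide

lemma cond_eq (b : String) :
    pvResult.any (fun r => b == r) = ((b != "") && pvOk b pvWords) := by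
  rw [Bool.eq_iff_iff]
  simp only [List.any_eq_true, beq_iff_eq, Bool.and_eq_true, bne_iff_ne, ne_eq]
  constructor
  · rintro ⟨r, hr, rfl⟩
    have hb : b ≠ "" := pvConcats_ne_empty 4 pvWords pvWords_ne_empty b (pvResult_sub b hr)
    exact ⟨hb, (pvOk_iff_mem_concats 4 pvWords (by decide) pvWords_ne_empty b hb).mpr
      (pvResult_sub b hr)⟩
  · rintro ⟨hb, hok⟩
    exact ⟨b, pvConcats_sub b
      ((pvOk_iff_mem_concats 4 pvWords (by decide) pvWords_ne_empty b hb).mp hok), rfl⟩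

-- ===== VERDICT (by name: the statement is the Claim_ definition above) =====
theorem solution_spec : Claim_equal_solution := by
  intro babbling _
  unfold Spec_solution solution solution_alt
  refine PySem.List.foldl_congr_mem _ _ _ _ ?_
  intro acc b _
  rw [cond_eq b]
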